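-- pv_equiv track=rewrite | github.com/sohn0356-git/algorithm_study | Haebum/프로그래머스/p모의고사.py | solution
-- ===== SOURCE A (Python) =====
-- def solution(answers):
--     mathGiveUp1 = [1, 2, 3, 4, 5] * 2000
--     mathGiveUp2 = [2, 1, 2, 3, 2, 4, 2, 5] * 1300
--     mathGiveUp3 = [3, 3, 1, 1, 2, 2, 4, 4, 5, 5] * 1000
--
--     num1 = 0
--     num2 = 0
--     num3 = 0
--
--     for i in range(0,len(answers)):
--         if answers[i] == mathGiveUp1[i]:
--             num1 += 1
--         if answers[i] == mathGiveUp2[i]: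
--             num2 += 1
--         if answers[i] == mathGiveUp3[i]:
--             num3 += 1
--
--     if num1 > num2 :
--         if num1 > num3:
--             answer= [1]
--         elif num1 < num3:
--             answer = [3]
--         else:
--             answer = [1,3]
--     elif num1 < num2:
--         if num2 > num3:
--             answer = [2]
--         elif num2 < num3:
--             answer = [3]
--         else:
--             answer = [2, 3]
--     else:
--         if num1 > num3:
--             answer = [1,2]
--         elif num1 < num3:
--             answer = [3]
--         else:
--             answer= [1,2,3]
--
--     return answer
-- ===== SOURCE B (Python) =====
-- def solution(answers):
--     # One scan that records only a histogram of (position mod 40, answer) pairs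
--     # (40 = lcm of the three pattern lengths); the patterns are consulted only in
--     # a constant-size second stage that sums 40 histogram lookups per pattern.
--     pats = [[1, 2, 3, 4, 5],
--             [2, 1, 2, 3, 2, 4, 2, 5],
--             [3, 3, 1, 1, 2, 2, 4, 4, 5, 5]]
--     hist = {}
--     for i, a in enumerate(answers):
--         key = (i % 40, a)
--         hist[key] = hist.get(key, 0) + 1
--     scores = [sum(hist.get((r, p[r % len(p)]), 0) for r in range(40)) for p in pats]
--     m = max(scores)
--     return [k + 1 for k, s in enumerate(scores) if s == m]
-- ===== Notes on version B (the rewrite author's own statement) =====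
-- stated objective: alternative
-- what changed: B never compares answers to patterns during the scan: one pass builds a histogram keyed by (index mod 40, answer) (40 = lcm of the pattern lengths), each pattern's score is then a constant 40-term sum of histogram lookups, and the nested tie-breaking cascade is replaced by max(scores) plus a filter.
import Mathlib
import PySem

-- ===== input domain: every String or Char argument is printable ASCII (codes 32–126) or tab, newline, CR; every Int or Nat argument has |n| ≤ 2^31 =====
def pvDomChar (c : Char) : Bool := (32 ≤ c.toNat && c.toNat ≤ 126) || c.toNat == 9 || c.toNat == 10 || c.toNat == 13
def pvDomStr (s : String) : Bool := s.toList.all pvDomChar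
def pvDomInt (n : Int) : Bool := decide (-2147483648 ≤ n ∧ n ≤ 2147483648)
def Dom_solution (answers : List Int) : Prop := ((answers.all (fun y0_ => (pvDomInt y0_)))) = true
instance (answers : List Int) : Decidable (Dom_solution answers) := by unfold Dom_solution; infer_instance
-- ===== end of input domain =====

-- B scans the answers once building a histogram keyed by (index mod 40, answer)
-- (40 = lcm of the three pattern lengths), then computes each pattern's score as a
-- constant 40-term sum of histogram lookups and picks the argmax by max-plus-filter;
-- A compares every answer to three pre-expanded pattern lists and tie-breaks by a cascade.

-- ===== PORT A =====
-- pyGetD with default 0 is exact here: Pre_solution keeps every index inside all four lists.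
def solution (answers : List Int) : List Int :=
  let mathGiveUp1 : List Int := (List.replicate 2000 ([1, 2, 3, 4, 5] : List Int)).flatten
  let mathGiveUp2 : List Int := (List.replicate 1300 ([2, 1, 2, 3, 2, 4, 2, 5] : List Int)).flatten
  let mathGiveUp3 : List Int := (List.replicate 1000 ([3, 3, 1, 1, 2, 2, 4, 4, 5, 5] : List Int)).flatten
  let nums : Int × Int × Int :=
    (PySem.List.pyRange 0 (answers.length : Int) 1).foldl
      (fun (t : Int × Int × Int) i =>
        (if PySem.List.pyGetD answers i 0 = PySem.List.pyGetD mathGiveUp1 i 0 then t.1 + 1 else t.1,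
         if PySem.List.pyGetD answers i 0 = PySem.List.pyGetD mathGiveUp2 i 0 then t.2.1 + 1 else t.2.1,
         if PySem.List.pyGetD answers i 0 = PySem.List.pyGetD mathGiveUp3 i 0 then t.2.2 + 1 else t.2.2))
      (0, 0, 0)
  let num1 := nums.1
  let num2 := nums.2.1
  let num3 := nums.2.2
  if num1 > num2 then
    if num1 > num3 then [1] else if num1 < num3 then [3] else [1, 3]
  else if num1 < num2 then
    if num2 > num3 then [2] else if num2 < num3 then [3] else [2, 3]
  else
    if num1 > num3 then [1, 2] else if num1 < num3 then [3] else [1, 2, 3]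

-- ===== PORT B =====
-- pyGetD with default 0 is exact: r % len(p) is a valid index of p; dict.get(key,0) is Dict.getD.
def solution_alt (answers : List Int) : List Int :=
  let pats : List (List Int) :=
    [[1, 2, 3, 4, 5], [2, 1, 2, 3, 2, 4, 2, 5], [3, 3, 1, 1, 2, 2, 4, 4, 5, 5]]
  let hist : PySem.Dict (Int × Int) Int :=
    (PySem.List.enumerate answers).foldl
      (fun d ia =>
        d.insert (PySem.Int.mod ia.1 40, ia.2) (d.getD (PySem.Int.mod ia.1 40, ia.2) 0 + 1))
      PySem.Dict.empty
  let scores : List Int :=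
    pats.map (fun p =>
      (PySem.List.pyRange 0 40 1).foldl
        (fun acc r => acc + hist.getD (r, PySem.List.pyGetD p (PySem.Int.mod r (p.length : Int)) 0) 0)
        0)
  let m : Int := (PySem.List.max? scores (fun y => y)).getD 0
  (PySem.List.enumerate scores).filterMap (fun ks => if ks.2 = m then some (ks.1 + 1) else none)

-- ===== PRECONDITION & SPEC =====
-- Pre_ excludes lists longer than 10000, on which A raises IndexError (mathGiveUp1 runs out).
def Pre_solution (answers : List Int) : Prop := answers.length ≤ 10000
instance (answers : List Int) : Decidable (Pre_solution answers) := by unfold Pre_solution; infer_instance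
def pvWitness_solution : List Int := [1, 3, 2, 4, 2]

def Spec_solution (answers : List Int) (out : List Int) : Prop := out = solution_alt answers
instance (answers : List Int) (out : List Int) : Decidable (Spec_solution answers out) := by unfold Spec_solution; infer_instance

-- ===== CLAIM (what is proved, stated in full; the proofs are below) =====
def Claim_equal_solution : Prop := ∀ (answers : List Int), Dom_solution answers → Pre_solution answers → Spec_solution answers (solution answers)

-- ===== LEMMAS AND PROOFS =====

def pvCnt (p : List Int) (xs : List Int) : Int :=
  ((PySem.List.enumerate xs).countP
    (fun ia => ia.2 == PySem.List.pyGetD p (PySem.Int.mod ia.1 (p.length : Int)) 0) : Int)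

theorem pv_getD_flatten_replicate (p : List Int) (d : Int) :
    ∀ (k i : Nat), i < k * p.length →
      ((List.replicate k p).flatten).getD i d = p.getD (i % p.length) d := by
  intro k
  induction k with
  | zero => intro i h; omega
  | succ k ih =>
    intro i h
    rw [List.replicate_succ, List.flatten_cons]
    by_cases hi : i < p.length
    · rw [List.getD_eq_getElem?_getD, List.getElem?_append_left hi,
        Nat.mod_eq_of_lt hi, ← List.getD_eq_getElem?_getD]
    · rw [Nat.not_lt] at hi
      have hexp : i < k * p.length + p.length := by rw [← Nat.succ_mul]; exact h
      rw [List.getD_eq_getElem?_getD, List.getElem?_append_right hi,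
        ← List.getD_eq_getElem?_getD, ih (i - p.length) (by omega)]
      congr 1
      obtain ⟨j, rfl⟩ : ∃ j, i = p.length + j := ⟨i - p.length, by omega⟩
      simp [Nat.add_mod_left]

theorem pv_countP_congr {α : Type} (l : List α) (p q : α → Bool)
    (h : ∀ x ∈ l, p x = q x) : l.countP p = l.countP q := by
  induction l with
  | nil => rfl
  | cons x t ih =>
    simp only [List.countP_cons, h x (by simp), ih (fun y hy => h y (by simp [hy]))]

theorem pv_A_count (p : List Int) (k : Nat) (xs : List Int)
    (hlen : xs.length ≤ k * p.length) :
    (PySem.List.pyRange 0 (xs.length : Int) 1).foldl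
      (fun (acc : Int) i =>
        if PySem.List.pyGetD xs i 0 = PySem.List.pyGetD ((List.replicate k p).flatten) i 0
        then acc + 1 else acc) 0
    = pvCnt p xs := by
  rw [PySem.List.foldl_ite_add_one]
  unfold pvCnt
  rw [PySem.List.enumerate_eq_map_pyRange (d := 0), List.countP_map, zero_add]
  congr 1
  apply pv_countP_congr
  intro j hj
  rw [PySem.List.mem_pyRange_one] at hj
  obtain ⟨m, rfl⟩ : ∃ m : Nat, j = (m : Int) := ⟨j.toNat, (Int.toNat_of_nonneg hj.1).symm⟩
  have hm : m < k * p.length := by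
    have := hj.2; omega
  have hval : PySem.List.pyGetD ((List.replicate k p).flatten) (m : Int) 0
      = PySem.List.pyGetD p (PySem.Int.mod (m : Int) (p.length : Int)) 0 := by
    rw [PySem.List.pyGetD_natCast, PySem.Int.mod_natCast, PySem.List.pyGetD_natCast,
      pv_getD_flatten_replicate p 0 k m hm]
  rw [hval]
  exact (Bool.beq_eq_decide_eq _ _).symm

-- indicator-sum over a Nodup list containing x (Nat values)
theorem pv_sum_indicator_zero {α : Type} [DecidableEq α] (x : α) (R : List α) (hx : x ∉ R)
    (w : α → Nat) : (R.map (fun r => if r = x then w r else 0)).sum = 0 := by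
  induction R with
  | nil => rfl
  | cons r R ih =>
    simp only [List.mem_cons, not_or] at hx
    have hne : r ≠ x := Ne.symm hx.1
    simp [List.map_cons, ih hx.2, hne]

theorem pv_sum_indicator {α : Type} [DecidableEq α] (x : α) (w : α → Nat) :
    ∀ (R : List α), R.Nodup → x ∈ R →
    (R.map (fun r => if r = x then w r else 0)).sum = w x := by
  intro R
  induction R with
  | nil => intro _ h; cases h
  | cons r R ih =>
    intro hnd hmem
    rcases List.mem_cons.mp hmem with rfl | hmem'
    · simp [pv_sum_indicator_zero x R (List.nodup_cons.mp hnd).1 w]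
    · have hne : r ≠ x := fun h => (List.nodup_cons.mp hnd).1 (h ▸ hmem')
      simp [hne, ih (List.nodup_cons.mp hnd).2 hmem']

-- summing per-residue counts over a Nodup residue list covering all keys (Nat version)
theorem pv_sum_count_nat (f : Int → Int) (R : List Int) (hR : R.Nodup) :
    ∀ (l : List (Int × Int)), (∀ q ∈ l, q.1 ∈ R) →
    (R.map (fun r => l.count (r, f r))).sum = l.countP (fun q => q.2 == f q.1) := by
  intro l
  induction l with
  | nil => intro _; simp
  | cons q t ih =>
    intro h
    have hmem : q.1 ∈ R := h q (by simp)
    have ht : ∀ q' ∈ t, q'.1 ∈ R := fun q' hq' => h q' (by simp [hq'])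
    have hcnt : ∀ r : Int, ((q :: t).count (r, f r)) = t.count (r, f r) + if q = (r, f r) then 1 else 0 := by
      intro r
      rw [List.count_cons]
      simp [beq_iff_eq]
    simp only [hcnt]
    rw [List.sum_map_add, ih ht, List.countP_cons]
    congr 1
    have hind : (R.map (fun r => if q = (r, f r) then 1 else 0)).sum
        = if q.2 == f q.1 then 1 else 0 := by
      by_cases hq : q.2 = f q.1
      · have hcg : ∀ r ∈ R, (if q = (r, f r) then 1 else 0) = (if r = q.1 then 1 else 0) := by
          intro r _
          by_cases hr : r = q.1
          · subst hr; simp [Prod.ext_iff, hq]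
          · have hcne : q ≠ (r, f r) := fun hc => hr (by rw [hc])
            simp [hr, hcne]
        rw [List.map_congr_left hcg, pv_sum_indicator q.1 (fun _ => 1) R hR hmem]
        simp [hq]
      · have hcg : ∀ r ∈ R, (if q = (r, f r) then 1 else 0) = 0 := by
          intro r _
          have hcne : q ≠ (r, f r) := fun hc => hq (by rw [hc])
          simp [hcne]
        rw [List.map_congr_left hcg]
        simp [hq]
    rw [hind]

theorem pv_B_score (p : List Int) (xs : List Int) (hdvd : p.length ∣ 40) :
    (PySem.List.pyRange 0 40 1).foldl
      (fun (acc : Int) r => acc +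
        ((PySem.List.enumerate xs).foldl
          (fun d ia =>
            d.insert (PySem.Int.mod ia.1 40, ia.2) (d.getD (PySem.Int.mod ia.1 40, ia.2) 0 + 1))
          PySem.Dict.empty).getD
          (r, PySem.List.pyGetD p (PySem.Int.mod r (p.length : Int)) 0) 0) 0
    = pvCnt p xs := by
  have hgetD : ∀ v : Int × Int,
      ((PySem.List.enumerate xs).foldl
        (fun d ia =>
          d.insert (PySem.Int.mod ia.1 40, ia.2) (d.getD (PySem.Int.mod ia.1 40, ia.2) 0 + 1))
        PySem.Dict.empty).getD v 0
      = (((PySem.List.enumerate xs).map (fun ia => (PySem.Int.mod ia.1 40, ia.2))).count v : Int) := by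
    intro v
    rw [← List.foldl_map (f := fun ia : Int × Int => (PySem.Int.mod ia.1 40, ia.2))
        (g := fun (d : PySem.Dict (Int × Int) Int) k => d.insert k (d.getD k 0 + 1)),
      PySem.Dict.getD_foldl_insert_add_one, PySem.Dict.getD_empty, zero_add]
  simp only [hgetD]
  rw [PySem.List.foldl_add
    (g := fun r => (((PySem.List.enumerate xs).map (fun ia => (PySem.Int.mod ia.1 40, ia.2))).count
      (r, PySem.List.pyGetD p (PySem.Int.mod r (p.length : Int)) 0) : Int)), zero_add]
  have hcast : ∀ (R : List Int) (c : Int → Nat),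
      (R.map (fun r => ((c r : Nat) : Int))).sum = ((R.map c).sum : Int) := by
    intro R c
    induction R with
    | nil => rfl
    | cons r R ih => simp [ih]
  rw [hcast]
  rw [pv_sum_count_nat (fun r => PySem.List.pyGetD p (PySem.Int.mod r (p.length : Int)) 0)
    (PySem.List.pyRange 0 40 1) (PySem.List.nodup_pyRange_one 0 40)
    _ (by
      intro q hq
      rw [List.mem_map] at hq
      obtain ⟨ia, _, rfl⟩ := hq
      rw [PySem.List.mem_pyRange_one]
      exact ⟨PySem.Int.mod_nonneg _ (by norm_num), PySem.Int.mod_lt _ (by norm_num)⟩)]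
  unfold pvCnt
  rw [List.countP_map]
  congr 1
  apply pv_countP_congr
  intro ia hia
  rw [PySem.List.mem_enumerate_iff] at hia
  obtain ⟨k, hk, rfl⟩ := hia
  simp only [Function.comp, zero_add]
  have h40 : PySem.Int.mod ((k : Int)) 40 = ((k % 40 : Nat) : Int) := by
    exact_mod_cast PySem.Int.mod_natCast k 40
  rw [h40, PySem.Int.mod_natCast, PySem.Int.mod_natCast]
  rw [Nat.mod_mod_of_dvd k hdvd]

-- A's tie-breaking cascade = max-plus-filter over the three scores
theorem pv_cascade (a b c : Int) :
    (if a > b then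
      if a > c then [1] else if a < c then [3] else [1, 3]
    else if a < b then
      if b > c then [2] else if b < c then [3] else [2, 3]
    else
      if a > c then [(1 : Int), 2] else if a < c then [3] else [1, 2, 3])
    = (PySem.List.enumerate [a, b, c]).filterMap
        (fun ks => if ks.2 = (PySem.List.max? [a, b, c] (fun y => y)).getD 0
                   then some (ks.1 + 1) else none) := by
  have h1 : PySem.List.enumerate [a, b, c] = [(0,a),(1,b),(2,c)] := by
    simp only [PySem.List.enumerate_cons, PySem.List.enumerate_nil]; norm_num
  have h2 : (PySem.List.max? [a, b, c] (fun y => y)).getD 0 = max (max a b) c := by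
    simp only [PySem.List.max?_id_cons, List.foldl, Option.getD_some]
  rw [h1, h2]
  simp only [List.filterMap_cons, List.filterMap_nil]
  split_ifs <;> first | rfl | (exfalso; omega)

-- ===== VERDICT (by name: the statement is the Claim_ definition above) =====
theorem solution_spec : Claim_equal_solution := by
  intro answers _ hpre
  have hlen : answers.length ≤ 10000 := hpre
  unfold Spec_solution solution solution_alt
  simp only []
  rw [PySem.List.foldl_prod_mk
        (f := fun (acc : Int) i =>
          if PySem.List.pyGetD answers i 0 =
             PySem.List.pyGetD ((List.replicate 2000 ([1,2,3,4,5] : List Int)).flatten) i 0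
          then acc + 1 else acc)
        (g := fun (t : Int × Int) i =>
          (if PySem.List.pyGetD answers i 0 =
              PySem.List.pyGetD ((List.replicate 1300 ([2,1,2,3,2,4,2,5] : List Int)).flatten) i 0
           then t.1 + 1 else t.1,
           if PySem.List.pyGetD answers i 0 =
              PySem.List.pyGetD ((List.replicate 1000 ([3,3,1,1,2,2,4,4,5,5] : List Int)).flatten) i 0
           then t.2 + 1 else t.2))]
  rw [PySem.List.foldl_prod_mk
        (f := fun (acc : Int) i =>
          if PySem.List.pyGetD answers i 0 =
             PySem.List.pyGetD ((List.replicate 1300 ([2,1,2,3,2,4,2,5] : List Int)).flatten) i 0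
          then acc + 1 else acc)
        (g := fun (acc : Int) i =>
          if PySem.List.pyGetD answers i 0 =
             PySem.List.pyGetD ((List.replicate 1000 ([3,3,1,1,2,2,4,4,5,5] : List Int)).flatten) i 0
          then acc + 1 else acc)]
  rw [pv_A_count _ 2000 answers (by simp; omega),
      pv_A_count _ 1300 answers (by simp; omega),
      pv_A_count _ 1000 answers (by simp; omega)]
  simp only [List.map]
  simp only [pv_B_score [1,2,3,4,5] answers (by decide),
      pv_B_score [2,1,2,3,2,4,2,5] answers (by decide),
      pv_B_score [3,3,1,1,2,2,4,4,5,5] answers (by decide)]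
  exact pv_cascade _ _ _
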